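-- pv_equiv track=rewrite | github.com/sravanbsn/rtrp_1 | drishti-link-backend/routers/admin.py | _hour_label
-- ===== SOURCE A (Python) =====
-- def _hour_label(hour: int) -> str:
--     labels = {
--         range(5, 9):   "Early Morning (5-9 AM)",
--         range(9, 12):  "Morning (9 AM-12 PM)",
--         range(12, 17): "Afternoon (12-5 PM)",
--         range(17, 20): "Evening (5-8 PM)",
--         range(20, 24): "Night (8 PM-12 AM)",
--         range(0, 5):   "Late Night (12-5 AM)",
--     }
--     for r, label in labels.items():
--         if hour in r:
--             return label
--     return f"Hour {hour}:00"
-- ===== SOURCE B (Python) =====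
-- _LABELS = [
--     "Late Night (12-5 AM)" if h < 5 else
--     "Early Morning (5-9 AM)" if h < 9 else
--     "Morning (9 AM-12 PM)" if h < 12 else
--     "Afternoon (12-5 PM)" if h < 17 else
--     "Evening (5-8 PM)" if h < 20 else
--     "Night (8 PM-12 AM)"
--     for h in range(24)
-- ]
--
-- def _hour_label(hour: int) -> str:
--     if 0 <= hour < 24:
--         return _LABELS[hour]
--     return f"Hour {hour}:00"
-- ===== Notes on version B (the rewrite author's own statement) =====
-- stated objective: idiomatic
-- what changed: Replaced the runtime scan over six range objects with a per-hour label table built once at module load; the function body is a single bounds check and direct list index.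
import Mathlib
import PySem

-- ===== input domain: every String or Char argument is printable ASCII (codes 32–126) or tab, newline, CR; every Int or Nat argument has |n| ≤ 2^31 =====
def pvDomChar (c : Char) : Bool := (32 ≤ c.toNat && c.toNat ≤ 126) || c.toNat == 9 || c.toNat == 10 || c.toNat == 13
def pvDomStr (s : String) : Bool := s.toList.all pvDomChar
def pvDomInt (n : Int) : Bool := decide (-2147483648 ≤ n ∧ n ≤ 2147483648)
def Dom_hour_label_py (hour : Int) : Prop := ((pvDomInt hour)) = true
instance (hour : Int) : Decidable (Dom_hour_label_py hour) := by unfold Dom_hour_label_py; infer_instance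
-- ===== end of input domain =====

-- B replaces A's per-call scan over six ranges with a precomputed 24-entry table and a single index (idiomatic).

-- ===== PORT A =====
-- A scans an association list of (half-open range, label) pairs in insertion order.
def hourLabelScan (hour : Int) : List ((Int × Int) × String) → String
  | [] => "Hour " ++ PySem.Int.toStr hour ++ ":00"
  | ((lo, hi), label) :: rest =>
      if lo ≤ hour ∧ hour < hi then label else hourLabelScan hour rest

def hour_label_py (hour : Int) : String :=
  hourLabelScan hour
    [ ((5, 9),   "Early Morning (5-9 AM)")
    , ((9, 12),  "Morning (9 AM-12 PM)")
    , ((12, 17), "Afternoon (12-5 PM)")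
    , ((17, 20), "Evening (5-8 PM)")
    , ((20, 24), "Night (8 PM-12 AM)")
    , ((0, 5),   "Late Night (12-5 AM)") ]

-- ===== PORT B =====
-- the precomputed table: entry h is the label of hour h (built once, as Source B's comprehension)
def hourLabelTable : List String :=
  (List.range 24).map (fun h =>
    if h < 5 then "Late Night (12-5 AM)"
    else if h < 9 then "Early Morning (5-9 AM)"
    else if h < 12 then "Morning (9 AM-12 PM)"
    else if h < 17 then "Afternoon (12-5 PM)"
    else if h < 20 then "Evening (5-8 PM)"
    else "Night (8 PM-12 AM)")

def hour_label_py_alt (hour : Int) : String :=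
  if 0 ≤ hour ∧ hour < 24 then hourLabelTable.getD hour.toNat ""
  else "Hour " ++ PySem.Int.toStr hour ++ ":00"

-- ===== PRECONDITION & SPEC =====
def Spec_hour_label_py (hour : Int) (out : String) : Prop := out = hour_label_py_alt hour
instance (hour : Int) (out : String) : Decidable (Spec_hour_label_py hour out) := by unfold Spec_hour_label_py; infer_instance

-- ===== CLAIM (what is proved, stated in full; the proofs are below) =====
def Claim_equal_hour_label_py : Prop := ∀ (hour : Int), Dom_hour_label_py hour → Spec_hour_label_py hour (hour_label_py hour)

-- ===== LEMMAS AND PROOFS =====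

theorem hour_label_eq (hour : Int) : hour_label_py hour = hour_label_py_alt hour := by
  by_cases h : 0 ≤ hour ∧ hour < 24
  · obtain ⟨h0, h24⟩ := h
    interval_cases hour <;> rfl
  · simp only [hour_label_py, hourLabelScan, hour_label_py_alt, if_neg h]
    have h' : hour < 0 ∨ 24 ≤ hour := by omega
    rcases h' with h' | h' <;>
      simp only [if_neg (by omega : ¬ ((5:Int) ≤ hour ∧ hour < 9)),
        if_neg (by omega : ¬ ((9:Int) ≤ hour ∧ hour < 12)),
        if_neg (by omega : ¬ ((12:Int) ≤ hour ∧ hour < 17)),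
        if_neg (by omega : ¬ ((17:Int) ≤ hour ∧ hour < 20)),
        if_neg (by omega : ¬ ((20:Int) ≤ hour ∧ hour < 24)),
        if_neg (by omega : ¬ ((0:Int) ≤ hour ∧ hour < 5))]

-- ===== VERDICT (by name: the statement is the Claim_ definition above) =====
theorem hour_label_py_spec : Claim_equal_hour_label_py := by
  intro hour _
  exact hour_label_eq hour
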